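-- pv_equiv track=rewrite | github.com/trongminh108/1000-exercises | Chapter_1/BT25.py | TongUocChan
-- ===== SOURCE A (Python) =====
-- from math import sqrt
--
-- def TongUocChan(n):
--     sum = 0
--     for i in range(1, int(sqrt(n))+1):
--         if n % i == 0:
--             if i % 2 == 0:
--                 sum += i
--             j = n // i
--             if j != i and j % 2 == 0:
--                 sum += j
--     return sum
-- ===== SOURCE B (Python) =====
-- from math import isqrt
--
-- def TongUocChan(n):
--     if n % 2 != 0:
--         return 0
--     m = n // 2
--     total = 0
--     for i in range(1, isqrt(m) + 1):
--         if m % i == 0: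
--             total += i
--             j = m // i
--             if j != i:
--                 total += j
--     return 2 * total
-- ===== Notes on version B (the rewrite author's own statement) =====
-- stated objective: alternative
-- what changed: B replaces A's even/odd-filtered sqrt(n) divisor pairing with a parity dispatch plus the identity 'sum of even divisors of n = 2 * sigma(n//2)': odd n returns 0 immediately, otherwise the loop sums ALL divisors of m = n//2 (no parity tests anywhere in the loop) and the result is doubled.
import Mathlib
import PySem

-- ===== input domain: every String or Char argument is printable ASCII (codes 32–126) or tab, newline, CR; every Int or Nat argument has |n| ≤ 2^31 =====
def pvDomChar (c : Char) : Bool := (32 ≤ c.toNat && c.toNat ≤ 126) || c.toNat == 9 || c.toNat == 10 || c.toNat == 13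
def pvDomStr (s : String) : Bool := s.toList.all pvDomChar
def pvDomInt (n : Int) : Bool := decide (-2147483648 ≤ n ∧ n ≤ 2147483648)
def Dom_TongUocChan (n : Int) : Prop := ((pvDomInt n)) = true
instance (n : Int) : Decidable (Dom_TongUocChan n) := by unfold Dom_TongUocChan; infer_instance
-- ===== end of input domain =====

-- B replaces A's even/odd-filtered divisor pairing with a parity dispatch plus the identity
-- "sum of even divisors of n = 2 * sigma(n // 2)": odd n returns 0 at once, otherwise the loop
-- sums ALL divisors of n // 2 (no parity tests) and the result is doubled (alternative, same cost).

-- ===== PORT A =====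
-- int(sqrt(n)): for 0 ≤ n ≤ 2^31 the float sqrt is exact enough that int(sqrt(n)) = isqrt(n),
-- so it is ported as Nat.sqrt n.toNat (exact on the admitted domain; n < 0 is outside Pre_,
-- where Python raises ValueError).
def TongUocChan (n : Int) : Int :=
  (PySem.List.pyRange 1 ((Nat.sqrt n.toNat : Int) + 1) 1).foldl
    (fun sum i =>
      if PySem.Int.mod n i = 0 then
        let sum' := if PySem.Int.mod i 2 = 0 then sum + i else sum
        let j := PySem.Int.floordiv n i
        if j ≠ i ∧ PySem.Int.mod j 2 = 0 then sum' + j else sum'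
      else sum) 0

-- ===== PORT B =====
-- isqrt(m) is Nat.sqrt m.toNat (exact: math.isqrt is integer sqrt, defined for m ≥ 0; m < 0
-- happens only for n < 0, which is outside Pre_, where Python B raises ValueError from isqrt).
def TongUocChan_alt (n : Int) : Int :=
  if PySem.Int.mod n 2 ≠ 0 then 0
  else
    let m := PySem.Int.floordiv n 2
    let total :=
      (PySem.List.pyRange 1 ((Nat.sqrt m.toNat : Int) + 1) 1).foldl
        (fun total i =>
          if PySem.Int.mod m i = 0 then
            let total' := total + i
            let j := PySem.Int.floordiv m i
            if j ≠ i then total' + j else total'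
          else total) 0
    2 * total

-- ===== PRECONDITION & SPEC =====
-- Pre_ excludes n < 0, where Python A raises ValueError (math domain error from sqrt).
def Pre_TongUocChan (n : Int) : Prop := 0 ≤ n
instance (n : Int) : Decidable (Pre_TongUocChan n) := by unfold Pre_TongUocChan; infer_instance
def pvWitness_TongUocChan : Int := 12

def Spec_TongUocChan (n : Int) (out : Int) : Prop := out = TongUocChan_alt n
instance (n : Int) (out : Int) : Decidable (Spec_TongUocChan n out) := by unfold Spec_TongUocChan; infer_instance

-- ===== CLAIM (what is proved, stated in full; the proofs are below) =====
def Claim_equal_TongUocChan : Prop := ∀ (n : Int), Dom_TongUocChan n → Pre_TongUocChan n → Spec_TongUocChan n (TongUocChan n)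

-- ===== LEMMAS AND PROOFS =====

-- A's loop body, as a per-index contribution (conditions translated to Nat).
def contribA (m i : Nat) : Int :=
  (if m % i = 0 ∧ i % 2 = 0 then (i : Int) else 0) +
  (if m % i = 0 ∧ m / i ≠ i ∧ m / i % 2 = 0 then ((m / i : Nat) : Int) else 0)

lemma list_sum_range (g : Nat → Int) (k : Nat) :
    ((List.range k).map g).sum = ∑ x ∈ Finset.range k, g x := rfl

-- The shared bridging step: a loop over range k with body "acc + contribution at 1+x"
-- equals a Finset sum over Ioc 0 k of the contribution function.
lemma fold_to_sum (g : Nat → Int) (k : Nat) :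
    (List.range k).foldl (fun acc x => acc + g (1 + x)) 0 = ∑ i ∈ Finset.Ioc 0 k, g i := by
  rw [PySem.List.foldl_add]
  have h2 : Finset.Ioc 0 k = Finset.Ico 1 (k + 1) := by
    ext x; simp [Finset.mem_Ioc, Finset.mem_Ico]; omega
  rw [h2, Finset.sum_Ico_eq_sum_range]
  simp only [list_sum_range, Nat.add_sub_cancel, zero_add]

-- Port A computed as a sum of contribA over 1..sqrt m.
lemma portA_sum (m : Nat) :
    TongUocChan (m : Int) = ∑ i ∈ Finset.Ioc 0 (Nat.sqrt m), contribA m i := by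
  unfold TongUocChan
  rw [PySem.List.pyRange_one]
  simp only [Int.toNat_natCast]
  have hk : ((Nat.sqrt m : Int) + 1 - 1).toNat = Nat.sqrt m := by omega
  rw [hk, List.foldl_map, ← fold_to_sum (contribA m) (Nat.sqrt m)]
  congr 1
  funext acc x
  have hx : (1 : Int) + (x : Int) = ((1 + x : Nat) : Int) := by push_cast; ring
  rw [hx]
  simp only [contribA, PySem.Int.mod_eq_emod_of_pos (by omega : (0:Int) < 2)]
  simp only [PySem.Int.mod_natCast, PySem.Int.floordiv_natCast, Nat.cast_eq_zero, ne_eq,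
    Nat.cast_inj]
  split_ifs <;> omega

-- B's loop contribution: i plus its cofactor (no parity tests).
def contribC (h i : Nat) : Int :=
  (if h % i = 0 then (i : Nat) else 0) +
  (if h % i = 0 ∧ h / i ≠ i then ((h / i : Nat) : Int) else 0)

-- Port B on even input 2*h computed as twice a sum of contribC over 1..sqrt h.
lemma portB_even (h : Nat) :
    TongUocChan_alt ((2 * h : Nat) : Int) = 2 * ∑ i ∈ Finset.Ioc 0 (Nat.sqrt h), contribC h i := by
  unfold TongUocChan_alt
  have hmod : PySem.Int.mod ((2 * h : Nat) : Int) 2 = 0 := by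
    rw [PySem.Int.mod_eq_emod_of_pos (by omega : (0:Int) < 2)]; omega
  rw [if_neg (by simp only [hmod]; omega)]
  have hdiv : PySem.Int.floordiv ((2 * h : Nat) : Int) 2 = ((h : Nat) : Int) := by
    rw [PySem.Int.floordiv_eq_ediv_of_pos (by omega : (0:Int) < 2)]; omega
  simp only [hdiv, Int.toNat_natCast]
  congr 1
  rw [PySem.List.pyRange_one]
  have hk : ((Nat.sqrt h : Int) + 1 - 1).toNat = Nat.sqrt h := by omega
  rw [hk, List.foldl_map, ← fold_to_sum (contribC h) (Nat.sqrt h)]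
  congr 1
  funext acc x
  have hx : (1 : Int) + (x : Int) = ((1 + x : Nat) : Int) := by push_cast; ring
  rw [hx]
  simp only [contribC, PySem.Int.mod_natCast, PySem.Int.floordiv_natCast, Nat.cast_eq_zero,
    ne_eq, Nat.cast_inj]
  split_ifs <;> omega

-- Port B on odd input 2*h+1 returns 0 at the parity test.
lemma portB_odd (h : Nat) : TongUocChan_alt ((2 * h + 1 : Nat) : Int) = 0 := by
  unfold TongUocChan_alt
  have hmod : PySem.Int.mod ((2 * h + 1 : Nat) : Int) 2 = 1 := by
    rw [PySem.Int.mod_eq_emod_of_pos (by omega : (0:Int) < 2)]; omega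
  rw [if_pos (by simp only [hmod]; omega)]

-- The weight A's loop applies to each divisor: keep it iff it is even.
def wEven (d : Nat) : Int := if d % 2 = 0 then (d : Nat) else 0

-- A's per-index contribution is the paired form of the weight wEven.
lemma contribA_eq (m i : Nat) :
    contribA m i = (if m % i = 0 then wEven i else 0) +
      (if m % i = 0 ∧ m / i ≠ i then wEven (m / i) else 0) := by
  unfold contribA wEven
  split_ifs <;> omega

-- The divisor-pairing identity, for ANY weight w: summing w i + w (m/i) (cofactor once)
-- over 1..sqrt m equals summing w over all divisors of m.
lemma pairing_gen (m : Nat) (hm : 1 ≤ m) (w : Nat → Int) :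
    ∑ i ∈ Finset.Ioc 0 (Nat.sqrt m),
        ((if m % i = 0 then w i else 0) + (if m % i = 0 ∧ m / i ≠ i then w (m / i) else 0))
      = ∑ d ∈ Finset.Ioc 0 m, (if m % d = 0 then w d else 0) := by
  have hs : Nat.sqrt m ≤ m := Nat.sqrt_le_self m
  have hsq : Nat.sqrt m * Nat.sqrt m ≤ m := Nat.sqrt_le m
  have hsq' : m < (Nat.sqrt m + 1) * (Nat.sqrt m + 1) := Nat.lt_succ_sqrt m
  rw [← Finset.sum_Ioc_consecutive _ (Nat.zero_le (Nat.sqrt m)) hs]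
  rw [Finset.sum_add_distrib]
  congr 1
  -- paired cofactor part: i ↦ m / i is a bijection onto the divisors above sqrt m
  rw [← Finset.sum_filter, ← Finset.sum_filter]
  refine Finset.sum_nbij' (fun i => m / i) (fun d => m / d) ?_ ?_ ?_ ?_ ?_
  · -- forward: a paired small divisor i lands in the large-divisor range
    intro i hi
    simp only [Finset.mem_filter, Finset.mem_Ioc] at hi ⊢
    obtain ⟨⟨hi0, his⟩, hdvd, hne⟩ := hi
    have hd : i ∣ m := Nat.dvd_of_mod_eq_zero hdvd
    have hmul : i * (m / i) = m := Nat.mul_div_cancel' hd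
    refine ⟨⟨?_, Nat.div_le_self m i⟩, Nat.mod_eq_zero_of_dvd (Nat.div_dvd_of_dvd hd)⟩
    by_contra hle
    push Not at hle
    have h1 : m ≤ Nat.sqrt m * Nat.sqrt m := by
      calc m = i * (m / i) := hmul.symm
        _ ≤ Nat.sqrt m * Nat.sqrt m := Nat.mul_le_mul his hle
    have h2 : i * (m / i) = Nat.sqrt m * Nat.sqrt m := by omega
    have h3 : Nat.sqrt m ≤ m / i := by
      by_contra h4
      push Not at h4
      have : i * (m / i) < Nat.sqrt m * Nat.sqrt m :=
        Nat.mul_lt_mul_of_le_of_lt his h4 (Nat.sqrt_pos.mpr hm)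
      omega
    have hms : m / i = Nat.sqrt m := Nat.le_antisymm hle h3
    have : i = Nat.sqrt m := by
      have := hmul
      rw [hms] at this
      exact Nat.eq_of_mul_eq_mul_right (Nat.sqrt_pos.mpr hm) (by omega)
    omega
  · -- backward: a large divisor d maps to a paired small divisor m / d
    intro d hd
    simp only [Finset.mem_filter, Finset.mem_Ioc] at hd ⊢
    obtain ⟨⟨hds, hdm⟩, hdvd⟩ := hd
    have hd' : d ∣ m := Nat.dvd_of_mod_eq_zero hdvd
    have hd0 : 0 < d := by omega
    have hstep : m / (m / d) = d := Nat.div_div_self hd' (by omega)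
    have hpos : 0 < m / d := Nat.div_pos (Nat.le_of_dvd (by omega) hd') hd0
    have hle : m / d ≤ Nat.sqrt m := by
      by_contra h4
      push Not at h4
      have : (Nat.sqrt m + 1) * (Nat.sqrt m + 1) ≤ d * (m / d) :=
        Nat.mul_le_mul (by omega) (by omega)
      rw [Nat.mul_div_cancel' hd'] at this
      omega
    refine ⟨⟨hpos, hle⟩, Nat.mod_eq_zero_of_dvd (Nat.div_dvd_of_dvd hd'), ?_⟩
    rw [hstep]; omega
  · -- left inverse
    intro i hi
    simp only [Finset.mem_filter, Finset.mem_Ioc] at hi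
    exact Nat.div_div_self (Nat.dvd_of_mod_eq_zero hi.2.1) (by omega)
  · -- right inverse
    intro d hd
    simp only [Finset.mem_filter, Finset.mem_Ioc] at hd
    exact Nat.div_div_self (Nat.dvd_of_mod_eq_zero hd.2) (by omega)
  · intro i _
    rfl

-- The even divisors of 2*h are exactly the doubles of the divisors of h.
lemma even_split (h : Nat) :
    ∑ d ∈ Finset.Ioc 0 (2 * h), (if (2 * h) % d = 0 then wEven d else 0)
      = 2 * ∑ e ∈ Finset.Ioc 0 h, (if h % e = 0 then (e : Int) else 0) := by
  have l1 : ∀ d ∈ Finset.Ioc 0 (2 * h), (if (2 * h) % d = 0 then wEven d else 0)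
      = if (2 * h) % d = 0 ∧ d % 2 = 0 then (d : Int) else 0 := by
    intro d _; unfold wEven; split_ifs <;> first | rfl | tauto
  have l2 : ∀ e ∈ Finset.Ioc 0 h, 2 * (if h % e = 0 then (e : Int) else 0)
      = if h % e = 0 then 2 * (e : Int) else 0 := by
    intro e _; split_ifs <;> ring
  rw [Finset.sum_congr rfl l1, Finset.mul_sum, Finset.sum_congr rfl l2,
    ← Finset.sum_filter, ← Finset.sum_filter]
  refine Finset.sum_nbij' (fun d => d / 2) (fun e => 2 * e) ?_ ?_ ?_ ?_ ?_
  · -- halving an even divisor of 2*h gives a divisor of h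
    intro d hd
    simp only [Finset.mem_filter, Finset.mem_Ioc] at hd ⊢
    obtain ⟨⟨hd0, hdm⟩, hdvd, hev⟩ := hd
    have h2d : 2 ∣ d := Nat.dvd_of_mod_eq_zero hev
    obtain ⟨c, rfl⟩ := h2d
    have : 2 * c ∣ 2 * h := Nat.dvd_of_mod_eq_zero hdvd
    have hc : c ∣ h := (Nat.mul_dvd_mul_iff_left (by omega : 0 < 2)).mp this
    exact ⟨⟨by omega, by omega⟩, Nat.mod_eq_zero_of_dvd (by simpa using hc)⟩
  · -- doubling a divisor of h gives an even divisor of 2*h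
    intro e he
    simp only [Finset.mem_filter, Finset.mem_Ioc] at he ⊢
    obtain ⟨⟨he0, heh⟩, hdvd⟩ := he
    have he' : e ∣ h := Nat.dvd_of_mod_eq_zero hdvd
    refine ⟨⟨by omega, by omega⟩,
      Nat.mod_eq_zero_of_dvd (Nat.mul_dvd_mul_left 2 he'), by omega⟩
  · -- left inverse
    intro d hd
    simp only [Finset.mem_filter, Finset.mem_Ioc] at hd
    show 2 * (d / 2) = d
    omega
  · -- right inverse
    intro e _
    show 2 * e / 2 = e
    omega
  · -- values agree: d = 2 * (d / 2) for even d
    intro d hd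
    simp only [Finset.mem_filter, Finset.mem_Ioc] at hd
    show (d : Int) = 2 * ((d / 2 : Nat) : Int)
    omega

-- An odd number has no even divisors.
lemma odd_zero (h : Nat) :
    ∑ d ∈ Finset.Ioc 0 (2 * h + 1), (if (2 * h + 1) % d = 0 then wEven d else 0) = 0 := by
  refine Finset.sum_eq_zero fun d hd => ?_
  simp only [Finset.mem_Ioc] at hd
  unfold wEven
  split_ifs with h1 h2
  · exfalso
    have hdvd : d ∣ 2 * h + 1 := Nat.dvd_of_mod_eq_zero h1
    have h2' : 2 ∣ d := Nat.dvd_of_mod_eq_zero h2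
    have : 2 ∣ 2 * h + 1 := h2'.trans hdvd
    omega
  · rfl
  · rfl

-- ===== VERDICT (by name: the statement is the Claim_ definition above) =====
theorem TongUocChan_spec : Claim_equal_TongUocChan := by
  intro n _ hpre
  unfold Pre_TongUocChan at hpre
  unfold Spec_TongUocChan
  obtain ⟨m, rfl⟩ : ∃ m : Nat, n = (m : Int) := ⟨n.toNat, by omega⟩
  rcases Nat.even_or_odd m with ⟨h, rfl⟩ | ⟨h, rfl⟩
  · -- even input 2*h
    rw [show h + h = 2 * h by ring] at *
    rcases Nat.eq_zero_or_pos h with rfl | hh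
    · rw [portA_sum, portB_even]
      decide
    · have hB : ∑ i ∈ Finset.Ioc 0 (Nat.sqrt h), contribC h i
          = ∑ e ∈ Finset.Ioc 0 h, (if h % e = 0 then (e : Int) else 0) := by
        rw [← pairing_gen h hh (fun e => (e : Int))]
        unfold contribC
        norm_num
      rw [portA_sum, portB_even,
        Finset.sum_congr rfl (fun i _ => contribA_eq (2 * h) i),
        pairing_gen (2 * h) (by omega) wEven, even_split, hB]
  · -- odd input 2*h+1
    rw [portA_sum, portB_odd,
      Finset.sum_congr rfl (fun i _ => contribA_eq (2 * h + 1) i),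
      pairing_gen (2 * h + 1) (by omega) wEven, odd_zero]
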